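-- pv_equiv track=rewrite | github.com/hashemimostafa/Think-Python-2nd-Edition-Questions-and-Solutions | 5.5-5.6.py | numbering
-- ===== SOURCE A (Python) =====
-- def numbering(li, n):
--     if n == 0:
--         return li
--     else:
--         k = 1
--         for i in range(len(li)):
--             li.insert(k + 3 * i, 1)
--             li.insert(k + 1 + 3 * i, 2)
--             li.insert(k + 2 + 3 * i, 1)
--             k += 1
--         return numbering(li, n-1)
-- ===== SOURCE B (Python) =====
-- def numbering(li, n):
--     for _ in range(n):
--         li = [v for x in li for v in (x, 1, 2, 1)]
--     return li
-- ===== Notes on version B (the rewrite author's own statement) =====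
-- stated objective: simpler
-- what changed: Each level is rebuilt in one linear flat-map pass ([x,1,2,1] per element) instead of three positional list.insert calls per element (each shifting the tail), and the recursion becomes a plain loop; B does not mutate the caller's list.
import Mathlib
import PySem

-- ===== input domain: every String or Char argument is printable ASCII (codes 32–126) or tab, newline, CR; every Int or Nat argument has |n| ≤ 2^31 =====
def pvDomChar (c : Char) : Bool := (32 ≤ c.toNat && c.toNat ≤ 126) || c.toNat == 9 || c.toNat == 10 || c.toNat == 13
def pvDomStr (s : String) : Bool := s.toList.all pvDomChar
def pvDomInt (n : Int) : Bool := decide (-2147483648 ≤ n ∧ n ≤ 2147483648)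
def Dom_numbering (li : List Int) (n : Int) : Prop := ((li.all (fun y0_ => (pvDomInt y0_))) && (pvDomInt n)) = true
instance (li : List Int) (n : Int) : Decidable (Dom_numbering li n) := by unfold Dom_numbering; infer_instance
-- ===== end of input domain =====

-- B rebuilds each level in one flat-map pass ([x,1,2,1] per element) instead of A's three
-- positional inserts per element, with a loop instead of recursion; A mutates li in place while
-- B does not — the equivalence claimed here is about the RETURN value only.

-- ===== PORT A =====
-- A's one pass: for i in range(len(li)): three inserts, k += 1; state = (list, k).
def numberingPassA (li : List Int) : List Int × Int :=
  (PySem.List.pyRange 0 (li.length : Int) 1).foldl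
    (fun (s : List Int × Int) i =>
      let l1 := PySem.List.insert s.1 (s.2 + 3 * i) 1
      let l2 := PySem.List.insert l1 (s.2 + 1 + 3 * i) 2
      let l3 := PySem.List.insert l2 (s.2 + 2 + 3 * i) 1
      (l3, s.2 + 1)) (li, 1)

def numbering (li : List Int) (n : Int) : List Int :=
  if n == 0 then li
  else if n < 0 then li  -- Python recurses forever (RecursionError) for n < 0; guard only for totality, excluded by Pre_
  else numbering (numberingPassA li).1 (n - 1)
termination_by n.toNat
decreasing_by simp_all; omega

-- ===== PORT B =====
def numbering_alt (li : List Int) (n : Int) : List Int :=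
  (PySem.List.pyRange 0 n 1).foldl
    (fun acc _ => acc.flatMap (fun x => [x, (1 : Int), 2, 1])) li

-- ===== PRECONDITION & SPEC =====
-- Pre_ excludes n < 0, on which Python A raises RecursionError.
def Pre_numbering (li : List Int) (n : Int) : Prop := 0 ≤ n
instance (li : List Int) (n : Int) : Decidable (Pre_numbering li n) := by unfold Pre_numbering; infer_instance
def pvWitness_numbering : List Int × Int := ([3, 9], 2)

def Spec_numbering (li : List Int) (n : Int) (out : List Int) : Prop := out = numbering_alt li n
instance (li : List Int) (n : Int) (out : List Int) : Decidable (Spec_numbering li n out) := by unfold Spec_numbering; infer_instance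

-- ===== CLAIM (what is proved, stated in full; the proofs are below) =====
def Claim_equal_numbering : Prop := ∀ (li : List Int) (n : Int), Dom_numbering li n → Pre_numbering li n → Spec_numbering li n (numbering li n)

-- ===== LEMMAS AND PROOFS =====

-- inserting at index u.length splits exactly between u and v
theorem insert_split (u v : List Int) (w : Int) :
    PySem.List.insert (u ++ v) ((u.length : Int)) w = u ++ w :: v := by
  rw [PySem.List.insert_natCast _ _ _ (by simp)]
  simp

-- invariant of A's single pass: first i elements already expanded
theorem passA_gen (rest : List Int) : ∀ (pre : List Int) (i : ℕ), pre.length = 4 * i →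
    ((PySem.List.pyRange (i : Int) ((i : Int) + (rest.length : Int)) 1).foldl
      (fun (s : List Int × Int) j =>
        let l1 := PySem.List.insert s.1 (s.2 + 3 * j) 1
        let l2 := PySem.List.insert l1 (s.2 + 1 + 3 * j) 2
        let l3 := PySem.List.insert l2 (s.2 + 2 + 3 * j) 1
        (l3, s.2 + 1)) (pre ++ rest, 1 + (i : Int))).1
    = pre ++ rest.flatMap (fun x => [x, (1 : Int), 2, 1]) := by
  induction rest with
  | nil =>
      intro pre i _
      rw [PySem.List.pyRange_one_eq_nil (by simp)]
      simp
  | cons x rest ih =>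
      intro pre i hpre
      rw [PySem.List.pyRange_one_cons (by simp; try omega)]
      rw [List.foldl_cons]
      have h1 : (1 + (i : Int) + 3 * (i : Int)) = (((pre ++ [x]).length : Nat) : Int) := by
        simp [hpre]; try omega
      have h2 : (1 + (i : Int) + 1 + 3 * (i : Int)) = (((pre ++ [x, 1]).length : Nat) : Int) := by
        simp [hpre]; try omega
      have h3 : (1 + (i : Int) + 2 + 3 * (i : Int)) = (((pre ++ [x, 1, 2]).length : Nat) : Int) := by
        simp [hpre]; try omega
      simp only []
      rw [show pre ++ x :: rest = (pre ++ [x]) ++ rest by simp, h1, insert_split]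
      rw [show (pre ++ [x]) ++ (1 : Int) :: rest = (pre ++ [x, 1]) ++ rest by simp, h2, insert_split]
      rw [show (pre ++ [x, 1]) ++ (2 : Int) :: rest = (pre ++ [x, 1, 2]) ++ rest by simp, h3, insert_split]
      rw [show (pre ++ [x, 1, 2]) ++ (1 : Int) :: rest = (pre ++ [x, 1, 2, 1]) ++ rest by simp]
      have key := ih (pre ++ [x, 1, 2, 1]) (i + 1) (by simp [hpre]; try omega)
      push_cast at key
      rw [show (i : Int) + ((x :: rest).length : Int) = (i : Int) + 1 + (rest.length : Int) by
        simp; try omega]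
      rw [show 1 + (i : Int) + 1 = 1 + ((i : Int) + 1) by ring]
      simpa using key

theorem passA_eq (li : List Int) :
    (numberingPassA li).1 = li.flatMap (fun x => [x, (1 : Int), 2, 1]) := by
  have := passA_gen li [] 0 rfl
  simpa [numberingPassA] using this

-- a fold whose function ignores the element depends only on the length
theorem foldl_const_len {α β : Type} (g : β → β) :
    ∀ (l1 l2 : List α) (init : β), l1.length = l2.length →
    l1.foldl (fun a _ => g a) init = l2.foldl (fun a _ => g a) init := by
  intro l1
  induction l1 with
  | nil => intro l2 init h; cases l2 <;> simp_all
  | cons x l1 ih =>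
      intro l2 init h
      cases l2 with
      | nil => simp at h
      | cons y l2 => simp at h; simpa using ih l2 (g init) h

theorem alt_succ (li : List Int) (m : ℕ) :
    numbering_alt li ((m : Int) + 1)
      = numbering_alt (li.flatMap (fun x => [x, (1 : Int), 2, 1])) (m : Int) := by
  unfold numbering_alt
  rw [PySem.List.pyRange_one_cons (by omega)]
  rw [List.foldl_cons]
  exact foldl_const_len _ _ _ _ (by simp [PySem.List.length_pyRange_one])

theorem num_cast : ∀ (m : ℕ) (li : List Int), numbering li (m : Int) = numbering_alt li (m : Int) := by
  intro m
  induction m with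
  | zero => intro li; simp [numbering, numbering_alt, PySem.List.pyRange_one_eq_nil]
  | succ m ih =>
      intro li
      have h0 : (((m : Int) + 1) == 0) = false := by simp; try omega
      have h1 : ¬ ((m : Int) + 1 < 0) := by omega
      rw [show ((m + 1 : ℕ) : Int) = (m : Int) + 1 by push_cast; ring]
      rw [numbering, h0]
      simp only [Bool.false_eq_true, if_false, if_neg h1, Int.add_sub_cancel]
      rw [passA_eq, ih, ← alt_succ]

-- ===== VERDICT (by name: the statement is the Claim_ definition above) =====
theorem numbering_spec : Claim_equal_numbering := by
  intro li n _ hpre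
  unfold Spec_numbering
  obtain ⟨m, rfl⟩ : ∃ m : ℕ, n = (m : Int) := ⟨n.toNat, (Int.toNat_of_nonneg hpre).symm⟩
  exact num_cast m li
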